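-- pv_equiv track=rewrite | github.com/luca16s/INF1025 | TESTE_3/T03_GIANFIGUEIREDO_2012431.py | verificaDobro
-- ===== SOURCE A (Python) =====
-- def verificaDobro(primeiroNumero, segundoNumero):
--     if primeiroNumero == 0 and segundoNumero == 0:
--         return False
--     else:
--         primeiroNumeroAtual = primeiroNumero%10
--         segundoNumeroAtual = segundoNumero%10
--
--         if primeiroNumeroAtual == segundoNumeroAtual:
--             return False
--         elif primeiroNumeroAtual < segundoNumeroAtual:
--             return False
--         else:
--             if primeiroNumero < 10 and segundoNumero < 10:
--                 if (segundoNumeroAtual*2) == primeiroNumeroAtual: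
--                     return True
--                 else:
--                     return False
--             else:
--                 prefixoPrimeiroNumero = primeiroNumero//10
--                 prefixoSegundoNumero = segundoNumero//10
--                 if verificaDobro(prefixoPrimeiroNumero, prefixoSegundoNumero) == True:
--                     return True
--                 else:
--                     return False
-- ===== SOURCE B (Python) =====
-- def verificaDobro(primeiroNumero, segundoNumero):
--     if primeiroNumero == 0 and segundoNumero == 0:
--         return False
--     a, b = primeiroNumero, segundoNumero
--     pa, pb = a % 10, b % 10
--     while a >= 10 or b >= 10:
--         if pa <= pb:
--             return False
--         a //= 10
--         b //= 10
--         pa, pb = a % 10, b % 10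
--     return pa > pb and pa == 2 * pb
-- ===== Notes on version B (the rewrite author's own statement) =====
-- stated objective: simpler
-- what changed: Replaced A's recursion (with a zero-check and duplicated False-branches at every level) by a single iterative while-loop: the both-zero check is hoisted to the top, the two False exits merge into one 'pa <= pb' test, and the doubling test is the loop's final formula.
import Mathlib
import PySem

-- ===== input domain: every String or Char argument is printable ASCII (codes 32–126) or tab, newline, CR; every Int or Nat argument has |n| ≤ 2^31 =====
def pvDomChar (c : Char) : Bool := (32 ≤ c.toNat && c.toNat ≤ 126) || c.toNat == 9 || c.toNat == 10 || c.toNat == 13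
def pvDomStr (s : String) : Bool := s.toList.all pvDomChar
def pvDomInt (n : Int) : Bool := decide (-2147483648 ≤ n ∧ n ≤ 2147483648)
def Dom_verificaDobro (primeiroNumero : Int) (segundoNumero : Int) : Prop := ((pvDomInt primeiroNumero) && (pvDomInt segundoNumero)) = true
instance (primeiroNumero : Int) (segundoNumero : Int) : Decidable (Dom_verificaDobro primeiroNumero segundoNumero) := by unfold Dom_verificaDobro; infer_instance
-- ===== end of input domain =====

-- B replaces A's recursive digit descent by a single iterative loop: the both-zero
-- check is hoisted out (it is reachable only at the top), the two False-branches
-- merge into one 'pa ≤ pb' exit, and the doubling test becomes the loop's final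
-- formula (objective: simpler; same cost).


-- ===== PORT A =====
-- structural recursion on a fuel bound (fuel = digits available; one unit is consumed per
-- recursive step, and a.toNat + b.toNat + 1 units always suffice, so the 0-fuel branch is unreachable)
def verificaDobroGo (fuel : Nat) (primeiroNumero : Int) (segundoNumero : Int) : Bool :=
  match fuel with
  | 0 => false
  | fuel + 1 =>
    if primeiroNumero = 0 ∧ segundoNumero = 0 then false
    else
      let primeiroNumeroAtual := PySem.Int.mod primeiroNumero 10
      let segundoNumeroAtual := PySem.Int.mod segundoNumero 10
      if primeiroNumeroAtual = segundoNumeroAtual then false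
      else if primeiroNumeroAtual < segundoNumeroAtual then false
      else
        if primeiroNumero < 10 ∧ segundoNumero < 10 then
          if segundoNumeroAtual * 2 = primeiroNumeroAtual then true else false
        else
          if verificaDobroGo fuel (PySem.Int.floordiv primeiroNumero 10)
              (PySem.Int.floordiv segundoNumero 10) = true then true else false

def verificaDobro (primeiroNumero : Int) (segundoNumero : Int) : Bool :=
  verificaDobroGo (primeiroNumero.toNat + segundoNumero.toNat + 1) primeiroNumero segundoNumero

-- ===== PORT B =====
-- the 'while a >= 10 or b >= 10' loop of Source B, one fuel unit per iteration
def vdLoop (fuel : Nat) (a : Int) (b : Int) : Bool :=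
  match fuel with
  | 0 => false
  | fuel + 1 =>
    let pa := PySem.Int.mod a 10
    let pb := PySem.Int.mod b 10
    if 10 ≤ a ∨ 10 ≤ b then
      if pa ≤ pb then false
      else vdLoop fuel (PySem.Int.floordiv a 10) (PySem.Int.floordiv b 10)
    else
      decide (pb < pa ∧ pa = 2 * pb)

def verificaDobro_alt (primeiroNumero : Int) (segundoNumero : Int) : Bool :=
  if primeiroNumero = 0 ∧ segundoNumero = 0 then false
  else vdLoop (primeiroNumero.toNat + segundoNumero.toNat + 1) primeiroNumero segundoNumero

-- ===== PRECONDITION & SPEC =====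
def Spec_verificaDobro (primeiroNumero : Int) (segundoNumero : Int) (out : Bool) : Prop := out = verificaDobro_alt primeiroNumero segundoNumero
instance (primeiroNumero : Int) (segundoNumero : Int) (out : Bool) : Decidable (Spec_verificaDobro primeiroNumero segundoNumero out) := by unfold Spec_verificaDobro; infer_instance

-- ===== CLAIM (what is proved, stated in full; the proofs are below) =====
def Claim_equal_verificaDobro : Prop := ∀ (primeiroNumero : Int) (segundoNumero : Int), Dom_verificaDobro primeiroNumero segundoNumero → Spec_verificaDobro primeiroNumero segundoNumero (verificaDobro primeiroNumero segundoNumero)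

-- ===== LEMMAS AND PROOFS =====
theorem verificaDobroGo_eq_vdLoop : ∀ (fuel : Nat) (a b : Int), a.toNat + b.toNat < fuel →
    verificaDobroGo fuel a b = vdLoop fuel a b := by
  intro fuel
  induction fuel with
  | zero => intro a b h; omega
  | succ f ih =>
    intro a b hf
    rw [verificaDobroGo, vdLoop]
    simp only [PySem.Int.mod_eq_emod_of_pos (show (0:Int) < 10 by norm_num),
               PySem.Int.floordiv_eq_ediv_of_pos (show (0:Int) < 10 by norm_num)]
    by_cases hz : a = 0 ∧ b = 0
    · obtain ⟨ha, hb⟩ := hz; subst ha; subst hb; norm_num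
    · rw [if_neg hz]
      by_cases hbig : 10 ≤ a ∨ 10 ≤ b
      · rw [if_pos hbig]
        rw [if_neg (show ¬(a < 10 ∧ b < 10) by omega)]
        by_cases heq : a % 10 = b % 10
        · rw [if_pos heq, if_pos (show a % 10 ≤ b % 10 by omega)]
        · rw [if_neg heq]
          by_cases hlt : a % 10 < b % 10
          · rw [if_pos hlt, if_pos (show a % 10 ≤ b % 10 by omega)]
          · rw [if_neg hlt, if_neg (show ¬ a % 10 ≤ b % 10 by omega),
                ih (a/10) (b/10) (by omega)]
            cases vdLoop f (a/10) (b/10) <;> simp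
      · rw [if_neg hbig]
        by_cases heq : a % 10 = b % 10
        · rw [if_pos heq]; simp; omega
        · rw [if_neg heq]
          by_cases hlt : a % 10 < b % 10
          · rw [if_pos hlt]; simp; omega
          · rw [if_neg hlt, if_pos (show a < 10 ∧ b < 10 by omega)]
            by_cases hdb : b % 10 * 2 = a % 10
            · rw [if_pos hdb]; simp; omega
            · rw [if_neg hdb]; simp; omega

-- ===== VERDICT (by name: the statement is the Claim_ definition above) =====
theorem verificaDobro_spec : Claim_equal_verificaDobro := by
  intro a b _
  unfold Spec_verificaDobro verificaDobro_alt verificaDobro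
  split
  · rename_i h; obtain ⟨ha, hb⟩ := h; subst ha; subst hb; rfl
  · exact verificaDobroGo_eq_vdLoop _ a b (by omega)
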